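-- pv_equiv track=rewrite | github.com/0xStryK3R/Scaler-DSA-Revision | python/Day-52/HW_3.py | solve
-- ===== SOURCE A (Python) =====
-- def solve(A, B):
--     mod = 10**9 + 7
--     min_q = []
--     max_q = []
--     min_top = -1
--     max_top = -1
--
--     ans = 0
--
--     for i, num in enumerate(A):
--         if not min_q:
--             min_q.append(i)
--             min_top += 1
--         else:
--             if min_q[min_top] <= (i - B):
--                 min_top += 1
--             while min_q and A[min_q[-1]] > num:
--                 min_q.pop()
--             min_q.append(i)
--             if min_top > len(min_q) - 1:
--                 min_top = len(min_q) - 1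
--
--         if not max_q:
--             max_q.append(i)
--             max_top += 1
--         else:
--             if max_q[max_top] <= (i - B):
--                 max_top += 1
--             while max_q and A[max_q[-1]] < num:
--                 max_q.pop()
--             max_q.append(i)
--             if max_top > len(max_q) - 1:
--                 max_top = len(max_q) - 1
--
--         if i >= B - 1:
--             ans += A[min_q[min_top]] + A[max_q[max_top]]
--
--     return ans % mod
-- ===== SOURCE B (Python) =====
-- def solve(A, B):
--     mod = 10**9 + 7
--     total = 0
--     for i in range(len(A) - B + 1):
--         w = A[i:i+B]
--         total += min(w) + max(w)
--     return total % mod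
-- ===== Notes on version B (the rewrite author's own statement) =====
-- stated objective: simpler
-- what changed: Replaced the incremental monotonic-queue/top-pointer bookkeeping by a direct brute force that rescans every window A[i:i+B] with min()/max(), summing and reducing mod 10**9+7 once at the end.
-- outside the precondition, e.g. on solve([1, 2], 0): A returns 6, B raises ValueError
import Mathlib
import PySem

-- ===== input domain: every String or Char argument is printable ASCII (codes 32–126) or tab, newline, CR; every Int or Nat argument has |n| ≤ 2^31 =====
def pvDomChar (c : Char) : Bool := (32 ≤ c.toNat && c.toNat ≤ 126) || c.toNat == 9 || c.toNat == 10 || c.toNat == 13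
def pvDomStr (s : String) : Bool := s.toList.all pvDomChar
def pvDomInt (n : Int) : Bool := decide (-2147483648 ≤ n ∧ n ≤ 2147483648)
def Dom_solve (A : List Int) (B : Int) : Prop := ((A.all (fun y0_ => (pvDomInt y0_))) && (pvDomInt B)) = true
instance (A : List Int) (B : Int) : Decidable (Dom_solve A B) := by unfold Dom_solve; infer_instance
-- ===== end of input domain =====

-- B replaces A's monotonic-queue/top-pointer bookkeeping by a direct brute force over every
-- window (min/max of each slice), summed and reduced mod 10^9+7 once at the end (simpler, not faster).

-- ===== PORT A =====
-- 'while q and A[q[-1]] cmp num: q.pop()' (cmp is '>' for the min queue, '<' for the max queue)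
def pvPopLoop (A : List Int) (cmp : Int → Int → Bool) (num : Int) (q : List Int) : List Int :=
  if h : q = [] then q
  else if cmp (PySem.List.pyGetD A (PySem.List.pyGetD q (-1) 0) 0) num then
    pvPopLoop A cmp num q.dropLast
  else q
termination_by q.length
decreasing_by simp [List.length_dropLast]; exact List.length_pos_iff.mpr h

-- the identical min-/max-queue update block of A's loop body (cmp as above)
def pvStep (A : List Int) (B : Int) (cmp : Int → Int → Bool) (i num : Int)
    (q : List Int) (top : Int) : List Int × Int :=
  if q = [] then (q ++ [i], top + 1)
  else
    let top := if PySem.List.pyGetD q top 0 ≤ i - B then top + 1 else top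
    let q := pvPopLoop A cmp num q
    let q := q ++ [i]
    let top := if top > PySem.List.len q - 1 then PySem.List.len q - 1 else top
    (q, top)

def solve (A : List Int) (B : Int) : Int :=
  let md : Int := 10 ^ 9 + 7
  let st := (PySem.List.enumerate A 0).foldl
    (fun (st : List Int × Int × List Int × Int × Int) p =>
      let (minq, mintop, maxq, maxtop, ans) := st
      let (minq, mintop) := pvStep A B (fun a b => decide (a > b)) p.1 p.2 minq mintop
      let (maxq, maxtop) := pvStep A B (fun a b => decide (a < b)) p.1 p.2 maxq maxtop
      let ans := if p.1 ≥ B - 1 then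
          ans + PySem.List.pyGetD A (PySem.List.pyGetD minq mintop 0) 0
              + PySem.List.pyGetD A (PySem.List.pyGetD maxq maxtop 0) 0
        else ans
      (minq, mintop, maxq, maxtop, ans))
    ([], -1, [], -1, 0)
  PySem.Int.mod st.2.2.2.2 md

-- ===== PORT B =====
def solve_alt (A : List Int) (B : Int) : Int :=
  let md : Int := 10 ^ 9 + 7
  let total := (PySem.List.pyRange 0 (PySem.List.len A - B + 1) 1).foldl
    (fun total i =>
      let w := PySem.List.slice A (some i) (some (i + B))
      total + ((PySem.List.min? w (fun x => x)).getD 0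
             + (PySem.List.max? w (fun x => x)).getD 0))
    0
  PySem.Int.mod total md

-- ===== PRECONDITION & SPEC =====
-- Pre_ excludes B ≤ 0: there A's window bookkeeping still returns a number, but that value is an
-- artefact of the deque code (window size ≤ 0 is meaningless) and B's min()/max() of an empty
-- slice raises ValueError, so those inputs are outside the claim.
def Pre_solve (A : List Int) (B : Int) : Prop := 1 ≤ B
instance (A : List Int) (B : Int) : Decidable (Pre_solve A B) := by unfold Pre_solve; infer_instance
def pvWitness_solve : List Int × Int := ([1, 2, 3], 2)
def Spec_solve (A : List Int) (B : Int) (out : Int) : Prop := out = solve_alt A B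
instance (A : List Int) (B : Int) (out : Int) : Decidable (Spec_solve A B out) := by unfold Spec_solve; infer_instance

-- ===== CLAIM (what is proved, stated in full; the proofs are below) =====
def Claim_equal_solve : Prop := ∀ (A : List Int) (B : Int), Dom_solve A B → Pre_solve A B → Spec_solve A B (solve A B)

-- ===== LEMMAS AND PROOFS =====

-- value of A at (a nonnegative) index j, and the comparison key g = gv ∘ val used by one queue
def pvVal (A : List Int) (j : Int) : Int := PySem.List.pyGetD A j 0

-- canonical form of the queue: popping from the back while g(last) > c, then appending
def pvPop (A : List Int) (gv : Int → Int) (c : Int) (q : List Int) : List Int :=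
  (q.reverse.dropWhile (fun j => decide (c < gv (pvVal A j)))).reverse

def pvStack (A : List Int) (gv : Int → Int) : Nat → List Int
  | 0 => [0]
  | k + 1 => pvPop A gv (gv (pvVal A ((k : Int) + 1))) (pvStack A gv k) ++ [(k : Int) + 1]

-- the per-window term of B
def pvWTerm (A : List Int) (B : Int) (i : Int) : Int :=
  (PySem.List.min? (PySem.List.slice A (some i) (some (i + B))) (fun x => x)).getD 0
  + (PySem.List.max? (PySem.List.slice A (some i) (some (i + B))) (fun x => x)).getD 0

-- invariant of one queue after processing indices 0..k
def pvInv (A : List Int) (B : Int) (gv : Int → Int) (k : Nat) (q : List Int) (top : Int) : Prop :=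
  q = pvStack A gv k ∧ 0 ≤ top ∧ top.toNat < q.length ∧
  (k : Int) - B < q.getD top.toNat 0 ∧
  ∀ p : Nat, p < top.toNat → q.getD p 0 ≤ (k : Int) - B


-- ---- generic facts about the pop loop ----

theorem pvPopLoop_eq (A : List Int) (cmp : Int → Int → Bool) (gv : Int → Int) (num : Int)
    (hc : ∀ v : Int, cmp v num = decide (gv num < gv v)) (q : List Int) :
    pvPopLoop A cmp num q = pvPop A gv (gv num) q := by
  induction hn : q.length using Nat.strong_induction_on generalizing q with
  | _ n ih =>
    subst hn
    unfold pvPopLoop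
    by_cases h : q = []
    · simp [h, pvPop]
    · have hrev : q.reverse = q.getLast h :: q.dropLast.reverse := by
        conv_lhs => rw [← List.dropLast_append_getLast h]
        simp
      have hlast : PySem.List.pyGetD q (-1) 0 = q.getLast h := PySem.List.pyGetD_neg_one q 0 h
      rw [dif_neg h, hlast, hc]
      by_cases hcmp : gv num < gv (PySem.List.pyGetD A (q.getLast h) 0)
      · rw [if_pos (by simpa using hcmp)]
        have hlen : q.dropLast.length < q.length := by
          simp [List.length_dropLast]; exact List.length_pos_iff.mpr h
        rw [ih q.dropLast.length hlen q.dropLast rfl]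
        unfold pvPop
        rw [hrev, List.dropWhile_cons]
        rw [if_pos (by simpa [pvVal] using hcmp)]
      · rw [if_neg (by simpa using hcmp)]
        unfold pvPop
        rw [hrev, List.dropWhile_cons]
        rw [if_neg (by simpa [pvVal] using hcmp), ← hrev, List.reverse_reverse]

theorem pvPop_prefix (A : List Int) (gv : Int → Int) (c : Int) (q : List Int) :
    pvPop A gv c q <+: q := by
  refine ⟨(q.reverse.takeWhile (fun j => decide (c < gv (pvVal A j)))).reverse, ?_⟩
  unfold pvPop
  rw [← List.reverse_append]
  conv_rhs => rw [← List.reverse_reverse q, ← List.takeWhile_append_dropWhile (p := fun j => decide (c < gv (pvVal A j))) (l := q.reverse)]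

theorem mem_pvPop (A : List Int) (gv : Int → Int) (c : Int) (q : List Int)
    (hmono : q.Pairwise (fun a b => gv (pvVal A a) ≤ gv (pvVal A b))) (x : Int) :
    x ∈ pvPop A gv c q ↔ x ∈ q ∧ gv (pvVal A x) ≤ c := by
  unfold pvPop
  set p : Int → Bool := fun j => decide (c < gv (pvVal A j)) with hp
  have hrev : q.reverse.Pairwise (fun a b => gv (pvVal A b) ≤ gv (pvVal A a)) :=
    List.pairwise_reverse.mpr hmono
  have hsplit : q.reverse = q.reverse.takeWhile p ++ q.reverse.dropWhile p :=
    (List.takeWhile_append_dropWhile).symm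
  constructor
  · intro hx
    rw [List.mem_reverse] at hx
    have hxq : x ∈ q := by
      rw [← List.mem_reverse, hsplit]; exact List.mem_append_right _ hx
    refine ⟨hxq, ?_⟩
    cases hd : q.reverse.dropWhile p with
    | nil => simp [hd] at hx
    | cons y ys =>
      have hy : p y = false := by
        have := List.head_dropWhile_not p (l := q.reverse) (by simp [hd])
        simpa [hd] using this
      have hyc : gv (pvVal A y) ≤ c := by
        simpa [hp] using hy
      rw [hd] at hx
      rcases List.mem_cons.mp hx with rfl | hx'
      · exact hyc
      · have hsub : (y :: ys).Pairwise (fun a b => gv (pvVal A b) ≤ gv (pvVal A a)) := by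
          have : (q.reverse.dropWhile p).Sublist q.reverse := List.dropWhile_sublist p
          rw [hd] at this
          exact hrev.sublist this
        exact le_trans (List.pairwise_cons.mp hsub |>.1 x hx') hyc
  · rintro ⟨hxq, hxc⟩
    rw [List.mem_reverse]
    have : x ∈ q.reverse := List.mem_reverse.mpr hxq
    rw [hsplit] at this
    rcases List.mem_append.mp this with h' | h'
    · have := List.mem_takeWhile_imp h'
      simp [hp] at this
      omega
    · exact h'

-- ---- structural facts about the canonical stack ----

theorem pvStack_facts (A : List Int) (gv : Int → Int) (k : Nat) :
    (∃ pre, pvStack A gv k = pre ++ [(k : Int)]) ∧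
    (∀ j ∈ pvStack A gv k, 0 ≤ j ∧ j ≤ (k : Int)) ∧
    (pvStack A gv k).Pairwise (· < ·) ∧
    (pvStack A gv k).Pairwise (fun a b => gv (pvVal A a) ≤ gv (pvVal A b)) := by
  induction k with
  | zero => refine ⟨⟨[], rfl⟩, ?_, ?_, ?_⟩ <;> simp [pvStack]
  | succ k ih =>
    obtain ⟨⟨pre, hpre⟩, hbd, hlt, hmono⟩ := ih
    have hpop := pvPop_prefix A gv (gv (pvVal A ((k : Int) + 1))) (pvStack A gv k)
    have hsub := hpop.sublist
    have hmem : ∀ x ∈ pvPop A gv (gv (pvVal A ((k : Int) + 1))) (pvStack A gv k),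
        x ∈ pvStack A gv k ∧ gv (pvVal A x) ≤ gv (pvVal A ((k : Int) + 1)) :=
      fun x hx => (mem_pvPop A gv _ _ hmono x).mp hx
    refine ⟨⟨_, rfl⟩, ?_, ?_, ?_⟩
    · intro j hj
      show 0 ≤ j ∧ j ≤ (k : Int) + 1
      simp only [pvStack, List.mem_append, List.mem_singleton] at hj
      rcases hj with h' | h'
      · have := hbd j (hmem j h').1; omega
      · omega
    · show ((pvPop A gv (gv (pvVal A ((k:Int)+1))) (pvStack A gv k)) ++ [(k:Int)+1]).Pairwise (· < ·)
      rw [List.pairwise_append]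
      refine ⟨hlt.sublist hsub, by simp, ?_⟩
      intro x hx y hy
      simp at hy; subst hy
      have := hbd x (hmem x hx).1; omega
    · show ((pvPop A gv (gv (pvVal A ((k:Int)+1))) (pvStack A gv k)) ++ [(k:Int)+1]).Pairwise _
      rw [List.pairwise_append]
      refine ⟨hmono.sublist hsub, by simp, ?_⟩
      intro x hx y hy
      simp at hy; subst hy
      exact (hmem x hx).2

theorem pvStack_ne_nil (A : List Int) (gv : Int → Int) (k : Nat) : pvStack A gv k ≠ [] := by
  obtain ⟨pre, hpre⟩ := (pvStack_facts A gv k).1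
  simp [hpre]

theorem pvStack_mem (A : List Int) (gv : Int → Int) (k m : Nat) :
    ((m : Int) ∈ pvStack A gv k ↔
      m ≤ k ∧ ∀ m' : Nat, m < m' → m' ≤ k → gv (pvVal A (m : Int)) ≤ gv (pvVal A (m' : Int))) := by
  induction k with
  | zero =>
    simp only [pvStack, List.mem_singleton]
    constructor
    · intro h
      have : m = 0 := by exact_mod_cast h
      subst this; exact ⟨le_refl _, fun m' h1 h2 => by omega⟩
    · rintro ⟨h1, -⟩
      have : m = 0 := Nat.le_zero.mp h1
      simp [this]
  | succ k ih =>
    obtain ⟨-, hbd, -, hmono⟩ := pvStack_facts A gv k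
    have hm : (m : Int) ∈ pvStack A gv (k + 1) ↔
        ((m : Int) ∈ pvStack A gv k ∧ gv (pvVal A (m : Int)) ≤ gv (pvVal A ((k : Int) + 1)))
        ∨ m = k + 1 := by
      simp only [pvStack, List.mem_append, List.mem_singleton,
        mem_pvPop A gv _ _ hmono]
      constructor
      · rintro (h | h)
        · exact Or.inl h
        · right; exact_mod_cast h
      · rintro (h | h)
        · exact Or.inl h
        · right; exact_mod_cast congrArg (Nat.cast : Nat → Int) h
    rw [hm, ih]
    constructor
    · rintro (⟨⟨h1, h2⟩, h3⟩ | rfl)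
      · refine ⟨by omega, fun m' hm1 hm2 => ?_⟩
        rcases Nat.lt_or_ge m' (k + 1) with h' | h'
        · exact h2 m' hm1 (by omega)
        · have : m' = k + 1 := by omega
          subst this
          simpa [Nat.cast_add] using h3
      · exact ⟨le_refl _, fun m' h1 h2 => by omega⟩
    · rintro ⟨h1, h2⟩
      rcases Nat.lt_or_ge m (k + 1) with h' | h'
      · left
        refine ⟨⟨by omega, fun m' hm1 hm2 => h2 m' hm1 (by omega)⟩, ?_⟩
        simpa [Nat.cast_add] using h2 (k + 1) h' (le_refl _)
      · right; omega

-- every element of the stack is the cast of a Nat ≤ k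
theorem pvStack_elem_nat (A : List Int) (gv : Int → Int) (k : Nat) (j : Int)
    (hj : j ∈ pvStack A gv k) : ∃ m : Nat, j = (m : Int) ∧ m ≤ k := by
  have := (pvStack_facts A gv k).2.1 j hj
  exact ⟨j.toNat, by omega, by omega⟩

-- ---- the step preserves the invariant ----

theorem getD_append_left {l1 l2 : List Int} {p : Nat} (h : p < l1.length) (d : Int) :
    (l1 ++ l2).getD p d = l1.getD p d := by
  simp [List.getD_eq_getElem?_getD, List.getElem?_append_left h]

theorem pvStep_inv (A : List Int) (B : Int) (hB : 1 ≤ B) (gv : Int → Int)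
    (cmp : Int → Int → Bool) (k : Nat)
    (hc : ∀ v : Int, cmp v (pvVal A ((k : Int) + 1)) = decide (gv (pvVal A ((k : Int) + 1)) < gv v))
    (q : List Int) (top : Int) (h : pvInv A B gv k q top) :
    pvInv A B gv (k + 1)
      (pvStep A B cmp ((k : Int) + 1) (pvVal A ((k : Int) + 1)) q top).1
      (pvStep A B cmp ((k : Int) + 1) (pvVal A ((k : Int) + 1)) q top).2 := by
  obtain ⟨hq, htop0, htlt, htgt, htle⟩ := h
  have hne : q ≠ [] := hq ▸ pvStack_ne_nil A gv k
  obtain ⟨-, hbd, hlt, hmono⟩ := pvStack_facts A gv k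
  rw [← hq] at hbd hlt hmono
  set i : Int := (k : Int) + 1 with hi
  set num : Int := pvVal A i with hnum
  set t : Nat := top.toNat with ht
  -- the popped queue is the canonical one
  have hq1 : pvPopLoop A cmp num q = pvPop A gv (gv num) q := pvPopLoop_eq A cmp gv num hc q
  set q1 : List Int := pvPop A gv (gv num) q with hq1d
  obtain ⟨d, hd⟩ := pvPop_prefix A gv (gv num) q
  rw [← hq1d] at hd
  set K : Nat := q1.length with hK
  have hKL : K ≤ q.length := by
    have := congrArg List.length hd
    simp at this
    omega
  have hstack1 : q1 ++ [i] = pvStack A gv (k + 1) := by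
    show pvPop A gv (gv num) q ++ [i] = _
    rw [hq]
    simp [pvStack, hnum, hi]
  -- the port's read of q[top]
  have hread : PySem.List.pyGetD q top 0 = q.getD t 0 := by
    rw [show top = ((t : Nat) : Int) by omega]
    simp [PySem.List.pyGetD_natCast]
  -- unfold the step
  unfold pvStep
  rw [if_neg hne, hread, hq1]
  set top1 : Int := if q.getD t 0 ≤ i - B then top + 1 else top with htop1
  -- facts about top1
  have htop1nn : 0 ≤ top1 := by rw [htop1]; split <;> omega
  have ht1le : top1.toNat ≤ q.length := by rw [htop1]; split <;> omega
  have ha : ∀ p : Nat, p < top1.toNat → p < q.length → q.getD p 0 ≤ i - B := by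
    intro p hp hpl
    by_cases hcnd : q.getD t 0 ≤ i - B
    · have htt : top1 = top + 1 := by rw [htop1, if_pos hcnd]
      rcases Nat.lt_or_ge p t with h' | h'
      · have := htle p h'; omega
      · have : p = t := by omega
        subst this; omega
    · have htt : top1 = top := by rw [htop1, if_neg hcnd]
      have := htle p (by omega)
      omega
  have hb : top1.toNat < q.length → i - B < q.getD top1.toNat 0 := by
    intro hlt1
    by_cases hcnd : q.getD t 0 ≤ i - B
    · have htt : top1 = top + 1 := by rw [htop1, if_pos hcnd]
      have ht1 : top1.toNat = t + 1 := by omega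
      rw [ht1]; rw [ht1] at hlt1
      have hadj : q.getD t 0 < q.getD (t + 1) 0 := by
        rw [List.getD_eq_getElem q 0 (by omega), List.getD_eq_getElem q 0 (by omega)]
        exact List.pairwise_iff_getElem.mp hlt t (t + 1) (by omega) (by omega) (by omega)
      omega
    · have htt : top1 = top := by rw [htop1, if_neg hcnd]
      have ht1 : top1.toNat = t := by omega
      rw [ht1]
      omega
  -- the clamped top
  set q2 : List Int := q1 ++ [i] with hq2
  have hlen2 : q2.length = K + 1 := by rw [hq2]; simp [← hK]
  have hlen2' : PySem.List.len q2 = (K : Int) + 1 := by rw [PySem.List.len_eq, hlen2]; push_cast; ring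
  set top2 : Int := if top1 > PySem.List.len q2 - 1 then PySem.List.len q2 - 1 else top1 with htop2
  have hgetK : q2.getD K 0 = i := by
    rw [hq2, hK]
    simp [List.getD_eq_getElem?_getD]
  have htrans : ∀ p : Nat, p < K → q2.getD p 0 = q.getD p 0 := by
    intro p hp
    rw [hq2, getD_append_left (by omega) 0, ← hd, getD_append_left (by omega) 0]
  show pvInv A B gv (k + 1) q2 top2
  unfold pvInv
  refine ⟨hstack1, ?_, ?_, ?_, ?_⟩
  · rw [htop2]; split <;> [rw [hlen2']; skip] <;> omega
  · rw [htop2, hlen2]; split <;> [rw [hlen2']; skip] <;> omega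
  · -- (k+1) - B < q2[top2]
    have hiB : ((k + 1 : Nat) : Int) - B = i - B := by push_cast [hi]; ring
    rw [hiB]
    rcases Nat.lt_or_ge top1.toNat K with hcase | hcase
    · have hnoclamp : top2 = top1 := by
        rw [htop2, hlen2']; rw [if_neg (by omega)]
      rw [hnoclamp, htrans top1.toNat hcase]
      exact hb (by omega)
    · have : top2.toNat = K := by
        rw [htop2, hlen2']; split <;> omega
      rw [this, hgetK]; omega
  · intro p hp
    have hiB : ((k + 1 : Nat) : Int) - B = i - B := by push_cast [hi]; ring
    rw [hiB]
    have hpK : p < K := by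
      rcases Nat.lt_or_ge top1.toNat K with hcase | hcase
      · have : top2 = top1 := by rw [htop2, hlen2']; rw [if_neg (by omega)]
        rw [this] at hp; omega
      · have : top2.toNat = K := by rw [htop2, hlen2']; split <;> omega
        omega
    have hpt1 : p < top1.toNat := by
      rcases Nat.lt_or_ge top1.toNat K with hcase | hcase
      · have : top2 = top1 := by rw [htop2, hlen2']; rw [if_neg (by omega)]
        rw [this] at hp; omega
      · omega
    rw [htrans p hpK]
    exact ha p hpt1 (by omega)

-- ---- the pointed element is the window extremum ----

theorem pvWindow (A : List Int) (B : Int) (hB : 1 ≤ B) (gv : Int → Int) (k : Nat)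
    (q : List Int) (top : Int) (h : pvInv A B gv k q top) :
    ∃ m : Nat, q.getD top.toNat 0 = (m : Int) ∧ (k : Int) - B < (m : Int) ∧ m ≤ k ∧
      ∀ m' : Nat, (k : Int) - B < (m' : Int) → m' ≤ k →
        gv (pvVal A (m : Int)) ≤ gv (pvVal A (m' : Int)) := by
  obtain ⟨hq, htop0, htlt, htgt, htle⟩ := h
  obtain ⟨-, hbd, hlt, hmono⟩ := pvStack_facts A gv k
  rw [← hq] at hbd hlt hmono
  set t : Nat := top.toNat with ht
  have hjmem : q.getD t 0 ∈ q := by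
    rw [List.getD_eq_getElem q 0 htlt]; exact List.getElem_mem _
  obtain ⟨m, hm0, hmk⟩ := pvStack_elem_nat A gv k _ (hq ▸ hjmem)
  have hm : q.getD t 0 = (m : Int) := by rw [hq]; exact hm0
  refine ⟨m, hm, by rw [← hm]; exact htgt, hmk, ?_⟩
  intro m' hm'1 hm'2
  -- pick an arg-min of gv∘val over the window
  set ids : List Nat := (List.range (k + 1)).filter (fun m'' => decide ((k : Int) - B < (m'' : Int))) with hids
  have hkids : k ∈ ids := by
    simp [hids, List.mem_filter]
    omega
  have hne : ids ≠ [] := fun h' => by simp [h'] at hkids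
  obtain ⟨ms, hms⟩ : ∃ ms, ms ∈ List.argmin (fun m'' : Nat => gv (pvVal A (m'' : Int))) ids := by
    cases hms' : List.argmin (fun m'' : Nat => gv (pvVal A (m'' : Int))) ids with
    | none => exact absurd (List.argmin_eq_none.mp hms') hne
    | some a => exact ⟨a, rfl⟩
  have hmsmem : ms ∈ ids := List.argmin_mem hms
  have hmsmin : ∀ y ∈ ids, gv (pvVal A (ms : Int)) ≤ gv (pvVal A (y : Int)) :=
    fun y hy => List.le_of_mem_argmin (f := fun m'' : Nat => gv (pvVal A (m'' : Int))) hy hms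
  have hmsw : ms ≤ k ∧ (k : Int) - B < (ms : Int) := by
    simp [hids, List.mem_filter] at hmsmem
    omega
  -- ms is in the stack
  have hmsstack : ((ms : Nat) : Int) ∈ q := by
    rw [hq, pvStack_mem]
    refine ⟨hmsw.1, fun m'' h1 h2 => ?_⟩
    exact hmsmin m'' (by simp [hids, List.mem_filter]; omega)
  -- its position is ≥ t
  obtain ⟨ps, hps, hpse⟩ := List.getElem_of_mem hmsstack
  have hpst : t ≤ ps := by
    by_contra hcon
    have := htle ps (by omega)
    rw [List.getD_eq_getElem q 0 hps, hpse] at this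
    omega
  have hmono' : gv (pvVal A (q.getD t 0)) ≤ gv (pvVal A ((ms : Nat) : Int)) := by
    have hpse' : q.getD ps 0 = ((ms : Nat) : Int) := by
      rw [List.getD_eq_getElem q 0 hps]; exact hpse
    rw [← hpse']
    rcases Nat.lt_or_eq_of_le hpst with h' | h'
    · rw [List.getD_eq_getElem q 0 htlt, List.getD_eq_getElem q 0 hps]
      exact List.pairwise_iff_getElem.mp hmono t ps htlt hps h'
    · rw [h']
  calc gv (pvVal A (m : Int)) = gv (pvVal A (q.getD t 0)) := by rw [hm]
    _ ≤ gv (pvVal A ((ms : Nat) : Int)) := hmono'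
    _ ≤ gv (pvVal A (m' : Int)) := hmsmin m' (by simp [hids, List.mem_filter]; omega)

-- ---- the two pointed values give B's window term ----

theorem pvTerm (A : List Int) (B : Int) (hB : 1 ≤ B) (k : Nat) (hk : k < A.length)
    (hw : (B : Int) - 1 ≤ (k : Int))
    (qmin : List Int) (topmin : Int) (qmax : List Int) (topmax : Int)
    (hmin : pvInv A B (fun x => x) k qmin topmin)
    (hmax : pvInv A B (fun x => -x) k qmax topmax) :
    pvVal A (qmin.getD topmin.toNat 0) + pvVal A (qmax.getD topmax.toNat 0)
      = pvWTerm A B ((k : Int) - B + 1) := by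
  set b : Nat := B.toNat with hb
  have hBb : B = (b : Int) := by omega
  have hs : (k : Int) - B + 1 = ((k + 1 - b : Nat) : Int) := by omega
  set s : Nat := k + 1 - b with hsdef
  have hsb : s + b = k + 1 := by omega
  -- the window slice
  have hslice : PySem.List.slice A (some ((s : Nat) : Int)) (some (((s : Nat) : Int) + (b : Nat))) =
      (A.drop s).take b := PySem.List.slice_natCast_add A s b
  set w : List Int := (A.drop s).take b with hwdef
  have hwlen : w.length = b := by
    simp [hwdef]
    omega
  have hwget : ∀ d : Nat, (hd : d < b) → w[d]'(by omega) = A[s + d]'(by omega) := by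
    intro d hd
    simp [hwdef]
  -- window membership: elements of w are exactly vals of window indices
  have hval : ∀ m : Nat, (hm : m < A.length) → pvVal A (m : Int) = A[m]'hm := by
    intro m hm
    simp [pvVal, PySem.List.pyGetD_natCast, List.getD_eq_getElem?_getD, List.getElem?_eq_getElem hm]
  have hmemw : ∀ x, x ∈ w → ∃ m : Nat, (k : Int) - B < (m : Int) ∧ m ≤ k ∧ x = pvVal A (m : Int) := by
    intro x hx
    obtain ⟨d, hd, hxd⟩ := List.getElem_of_mem hx
    refine ⟨s + d, by omega, by omega, ?_⟩
    rw [hval (s + d) (by omega), ← hxd, hwget d (by omega)]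
  have hinw : ∀ m : Nat, (k : Int) - B < (m : Int) → m ≤ k → pvVal A (m : Int) ∈ w := by
    intro m h1 h2
    have hm : s ≤ m := by omega
    have : pvVal A (m : Int) = w[m - s]'(by omega) := by
      rw [hwget (m - s) (by omega), hval m (by omega)]
      congr 1
      omega
    rw [this]
    exact List.getElem_mem _
  -- min side
  obtain ⟨mm, hmm, hmmB, hmmk, hmmall⟩ := pvWindow A B hB (fun x => x) k qmin topmin hmin
  obtain ⟨mx, hmx, hmxB, hmxk, hmxall⟩ := pvWindow A B hB (fun x => -x) k qmax topmax hmax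
  have hwne : w ≠ [] := by
    intro h'
    rw [h'] at hwlen
    simp at hwlen
    omega
  obtain ⟨x0, t0, hwx⟩ : ∃ x0 t0, w = x0 :: t0 := by
    rcases List.exists_cons_of_ne_nil hwne with ⟨x0, t0, h'⟩
    exact ⟨x0, t0, h'⟩
  have hminsome : PySem.List.min? w (fun x => x) = some (t0.foldl min x0) := by
    rw [hwx]; exact PySem.List.min?_id_cons x0 t0
  have hmaxsome : PySem.List.max? w (fun x => x) = some (t0.foldl max x0) := by
    rw [hwx]; exact PySem.List.max?_id_cons x0 t0
  set vmin : Int := t0.foldl min x0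
  set vmax : Int := t0.foldl max x0
  have h1 : vmin = pvVal A ((mm : Nat) : Int) := by
    have hmem : vmin ∈ w := PySem.List.min?_mem hminsome
    have hle : ∀ y ∈ w, vmin ≤ y := PySem.List.min?_isMin hminsome
    obtain ⟨m0, hm01, hm02, hm03⟩ := hmemw vmin hmem
    have h1 : vmin ≤ pvVal A ((mm : Nat) : Int) := hle _ (hinw mm hmmB hmmk)
    have h2 : pvVal A ((mm : Nat) : Int) ≤ vmin := by
      rw [hm03]; exact hmmall m0 hm01 hm02
    omega
  have h2 : vmax = pvVal A ((mx : Nat) : Int) := by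
    have hmem : vmax ∈ w := PySem.List.max?_mem hmaxsome
    have hle : ∀ y ∈ w, y ≤ vmax := PySem.List.max?_isMax hmaxsome
    obtain ⟨m0, hm01, hm02, hm03⟩ := hmemw vmax hmem
    have h1 : pvVal A ((mx : Nat) : Int) ≤ vmax := hle _ (hinw mx hmxB hmxk)
    have h2 : vmax ≤ pvVal A ((mx : Nat) : Int) := by
      rw [hm03]
      have := hmxall m0 hm01 hm02
      omega
    omega
  unfold pvWTerm
  rw [hs, hBb, hslice, hminsome, hmaxsome]
  simp only [Option.getD_some]
  rw [h1, h2, hmm, hmx]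

-- ---- the loop body of A, named ----

def pvF (A : List Int) (B : Int) : (List Int × Int × List Int × Int × Int) → (Int × Int) → (List Int × Int × List Int × Int × Int) :=
  fun st p =>
    let (minq, mintop, maxq, maxtop, ans) := st
    let (minq, mintop) := pvStep A B (fun a b => decide (a > b)) p.1 p.2 minq mintop
    let (maxq, maxtop) := pvStep A B (fun a b => decide (a < b)) p.1 p.2 maxq maxtop
    let ans := if p.1 ≥ B - 1 then
        ans + PySem.List.pyGetD A (PySem.List.pyGetD minq mintop 0) 0
            + PySem.List.pyGetD A (PySem.List.pyGetD maxq maxtop 0) 0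
      else ans
    (minq, mintop, maxq, maxtop, ans)

theorem solve_eq (A : List Int) (B : Int) :
    solve A B = PySem.Int.mod
      (((PySem.List.enumerate A 0).foldl (pvF A B) ([], -1, [], -1, 0)).2.2.2.2) (10 ^ 9 + 7) := rfl

theorem pvF_apply (A : List Int) (B : Int) (st : List Int × Int × List Int × Int × Int) (p : Int × Int) :
    pvF A B st p =
      ((pvStep A B (fun a b => decide (a > b)) p.1 p.2 st.1 st.2.1).1,
       (pvStep A B (fun a b => decide (a > b)) p.1 p.2 st.1 st.2.1).2,
       (pvStep A B (fun a b => decide (a < b)) p.1 p.2 st.2.2.1 st.2.2.2.1).1,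
       (pvStep A B (fun a b => decide (a < b)) p.1 p.2 st.2.2.1 st.2.2.2.1).2,
       if p.1 ≥ B - 1 then
          st.2.2.2.2
            + PySem.List.pyGetD A (PySem.List.pyGetD (pvStep A B (fun a b => decide (a > b)) p.1 p.2 st.1 st.2.1).1 (pvStep A B (fun a b => decide (a > b)) p.1 p.2 st.1 st.2.1).2 0) 0
            + PySem.List.pyGetD A (PySem.List.pyGetD (pvStep A B (fun a b => decide (a < b)) p.1 p.2 st.2.2.1 st.2.2.2.1).1 (pvStep A B (fun a b => decide (a < b)) p.1 p.2 st.2.2.1 st.2.2.2.1).2 0) 0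
        else st.2.2.2.2) := by
  rcases st with ⟨mq, mt, xq, xt, an⟩
  rcases hp : pvStep A B (fun a b => decide (a > b)) p.1 p.2 mq mt with ⟨mq2, mt2⟩
  rcases hp2 : pvStep A B (fun a b => decide (a < b)) p.1 p.2 xq xt with ⟨xq2, xt2⟩
  simp [pvF, hp, hp2]

theorem pvVal_at (A : List Int) (m : Nat) (hm : m < A.length) : pvVal A (m : Int) = A[m] := by
  simp [pvVal, PySem.List.pyGetD_natCast, List.getD_eq_getElem?_getD, List.getElem?_eq_getElem hm]

theorem pvRead (A : List Int) (q : List Int) (top : Int) (h : 0 ≤ top) :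
    PySem.List.pyGetD A (PySem.List.pyGetD q top 0) 0 = pvVal A (q.getD top.toNat 0) := by
  conv_lhs => rw [show top = ((top.toNat : Nat) : Int) from by omega]
  rw [PySem.List.pyGetD_natCast]
  rfl

theorem pvLoop (A : List Int) (B : Int) (hB : 1 ≤ B) (m : Nat) (hm1 : 1 ≤ m) (hm : m ≤ A.length) :
    pvInv A B (fun x => x) (m - 1)
        (((PySem.List.enumerate A 0).take m).foldl (pvF A B) ([], -1, [], -1, 0)).1
        (((PySem.List.enumerate A 0).take m).foldl (pvF A B) ([], -1, [], -1, 0)).2.1 ∧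
    pvInv A B (fun x => -x) (m - 1)
        (((PySem.List.enumerate A 0).take m).foldl (pvF A B) ([], -1, [], -1, 0)).2.2.1
        (((PySem.List.enumerate A 0).take m).foldl (pvF A B) ([], -1, [], -1, 0)).2.2.2.1 ∧
    (((PySem.List.enumerate A 0).take m).foldl (pvF A B) ([], -1, [], -1, 0)).2.2.2.2
      = ((List.range (m + 1 - B.toNat)).map (fun j => pvWTerm A B ((j : Nat) : Int))).sum := by
  induction m with
  | zero => omega
  | succ m ih =>
    rcases Nat.eq_zero_or_pos m with rfl | hmpos
    · -- first element
      obtain ⟨a, A', rfl⟩ : ∃ a A', A = a :: A' := by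
        cases A with
        | nil => simp at hm
        | cons a A' => exact ⟨a, A', rfl⟩
      have henum : ((PySem.List.enumerate (a :: A') 0).take 1) = [(0, a)] := by
        rw [PySem.List.enumerate_cons]
        rfl
      rw [henum]
      simp only [List.foldl_cons, List.foldl_nil, pvF_apply]
      have hstep : ∀ cmp : Int → Int → Bool, pvStep (a :: A') B cmp 0 a [] (-1) = ([0], 0) := by
        intro cmp
        unfold pvStep
        norm_num
      simp only [hstep]
      have hinv1 : pvInv (a :: A') B (fun x => x) 0 [0] 0 := by
        refine ⟨rfl, le_refl _, by simp, by simp; omega, fun p hp => by omega⟩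
      have hinv2 : pvInv (a :: A') B (fun x => -x) 0 [0] 0 := by
        refine ⟨rfl, le_refl _, by simp, by simp; omega, fun p hp => by omega⟩
      refine ⟨hinv1, hinv2, ?_⟩
      by_cases hcond : (0 : Int) ≥ B - 1
      · rw [if_pos hcond]
        have hb1 : B.toNat = 1 := by omega
        have hterm := pvTerm (a :: A') B hB 0 (by simp) (by omega) [0] 0 [0] 0 hinv1 hinv2
        rw [pvRead _ _ _ (le_refl _)]
        rw [show (0 : Nat) + 1 + 1 - B.toNat = 1 from by omega, List.range_one]
        rw [show ((0 : Nat) : Int) - B + 1 = ((0 : Nat) : Int) from by omega] at hterm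
        simp only [List.map_cons, List.map_nil, List.sum_cons, List.sum_nil]
        omega
      · rw [if_neg hcond]
        have hb2 : 1 + 1 - B.toNat = 0 := by omega
        rw [hb2]
        simp
    · -- inductive step: m ≥ 1, m + 1 ≤ length
      have hmlt : m < A.length := by omega
      have ih' := ih (by omega) (by omega)
      set st := ((PySem.List.enumerate A 0).take m).foldl (pvF A B) ([], -1, [], -1, 0) with hst
      obtain ⟨ihmin, ihmax, ihans⟩ := ih'
      have htake : (PySem.List.enumerate A 0).take (m + 1)
          = (PySem.List.enumerate A 0).take m ++ [((m : Int), A[m])] := by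
        have h1 : (PySem.List.enumerate A 0)[m]? = some ((m : Int), A[m]) := by
          rw [List.getElem?_eq_getElem (by rw [PySem.List.length_enumerate]; omega),
            PySem.List.getElem_enumerate]
          simp
        rw [List.take_add_one, h1]
        rfl
      rw [htake, List.foldl_append, List.foldl_cons, List.foldl_nil, ← hst, pvF_apply]
      have hnum : (A[m] : Int) = pvVal A ((m : Int)) := (pvVal_at A m hmlt).symm
      have hcast : ((m : Nat) : Int) = (((m - 1 : Nat) : Nat) : Int) + 1 := by omega
      have hstepmin := pvStep_inv A B hB (fun x => x) (fun a b => decide (a > b)) (m - 1)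
        (by intro v; rfl) st.1 st.2.1 ihmin
      have hstepmax := pvStep_inv A B hB (fun x => -x) (fun a b => decide (a < b)) (m - 1)
        (by intro v; simp only [decide_eq_decide]; omega) st.2.2.1 st.2.2.2.1 ihmax
      rw [show (m - 1 : Nat) + 1 = m by omega] at hstepmin hstepmax
      rw [← hcast, ← hnum] at hstepmin hstepmax
      refine ⟨hstepmin, hstepmax, ?_⟩
      have hmt0 := hstepmin.2.1
      have hxt0 := hstepmax.2.1
      by_cases hcond : ((m : Int)) ≥ B - 1
      · rw [if_pos hcond]
        have hterm := pvTerm A B hB m hmlt (by omega) _ _ _ _ hstepmin hstepmax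
        rw [pvRead _ _ _ hmt0, pvRead _ _ _ hxt0, ihans]
        have hble : B.toNat ≤ m + 1 := by omega
        have hr : m + 1 + 1 - B.toNat = (m + 1 - B.toNat) + 1 := by omega
        rw [hr, List.range_succ, List.map_append, List.sum_append]
        simp only [List.map_cons, List.map_nil, List.sum_cons, List.sum_nil]
        rw [show ((m + 1 - B.toNat : Nat) : Int) = (m : Int) - B + 1 by omega]
        omega
      · rw [if_neg hcond]
        have hr : m + 1 + 1 - B.toNat = m + 1 - B.toNat := by omega
        rw [hr, ihans]

theorem pvRange_nonpos (c : Int) (hc : c ≤ 0) : PySem.List.pyRange 0 c 1 = [] := by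
  simp [PySem.List.pyRange]
  omega

theorem solve_spec : Claim_equal_solve := by
  intro A B hdom hpre
  unfold Spec_solve
  have hB : 1 ≤ B := hpre
  rcases Nat.eq_zero_or_pos A.length with hn | hn
  · have hA : A = [] := List.length_eq_zero_iff.mp hn
    subst hA
    rw [solve_eq]
    unfold solve_alt
    rw [pvRange_nonpos _ (by simp [PySem.List.len_eq]; omega)]
    rfl
  · have hfull : (PySem.List.enumerate A 0).take A.length = PySem.List.enumerate A 0 := by
      apply List.take_of_length_le
      rw [PySem.List.length_enumerate]
    obtain ⟨-, -, hans⟩ := pvLoop A B hB A.length hn (le_refl _)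
    rw [hfull] at hans
    rw [solve_eq, hans]
    unfold solve_alt
    rw [PySem.List.foldl_add (g := fun i =>
      (PySem.List.min? (PySem.List.slice A (some i) (some (i + B))) (fun x => x)).getD 0
      + (PySem.List.max? (PySem.List.slice A (some i) (some (i + B))) (fun x => x)).getD 0)]
    have hmapeq : ((PySem.List.pyRange 0 (PySem.List.len A - B + 1) 1).map (fun i =>
        (PySem.List.min? (PySem.List.slice A (some i) (some (i + B))) (fun x => x)).getD 0
        + (PySem.List.max? (PySem.List.slice A (some i) (some (i + B))) (fun x => x)).getD 0)).sum
        = ((List.range (A.length + 1 - B.toNat)).map (fun j => pvWTerm A B ((j : Nat) : Int))).sum := by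
      rcases Nat.lt_or_ge (A.length + 1) B.toNat with hbgt | hble
      · rw [pvRange_nonpos _ (by rw [PySem.List.len_eq]; omega)]
        rw [show A.length + 1 - B.toNat = 0 by omega]
        rfl
      · have : PySem.List.len A - B + 1 = ((A.length + 1 - B.toNat : Nat) : Int) := by
          rw [PySem.List.len_eq]; omega
        rw [this, PySem.List.pyRange_zero_natCast, List.map_map]
        rfl
    rw [hmapeq]
    simp
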